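-- pv_equiv track=rewrite | github.com/freebsd/freebsd-src | tests/atf_python/sys/netlink/utils.py | get_bitmask_map
-- ===== SOURCE A (Python) =====
-- def get_bitmask_map(propmap, val):
--     v = 1
--     ret = {}
--     while val:
--         if v & val:
--             if v in propmap:
--                 ret[v] = propmap[v]
--             else:
--                 ret[v] = hex(v)
--             val -= v
--         v *= 2
--     return ret
-- ===== SOURCE B (Python) =====
-- def get_bitmask_map(propmap, val):
--     if not val:
--         return {}
--     high = 1 << (val.bit_length() - 1)
--     ret = get_bitmask_map(propmap, val - high)
--     ret[high] = propmap[high] if high in propmap else hex(high)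
--     return ret
-- ===== Notes on version B (the rewrite author's own statement) =====
-- stated objective: alternative
-- what changed: Replaces A's iterative low-to-high doubling probe (v*=2 with destructive subtraction from val) by a recursion that strips the highest set bit (1 << (bit_length-1)), recurses on the remainder, and inserts the highest bit's entry last, building the dict in ascending order on the way back up.
import Mathlib
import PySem

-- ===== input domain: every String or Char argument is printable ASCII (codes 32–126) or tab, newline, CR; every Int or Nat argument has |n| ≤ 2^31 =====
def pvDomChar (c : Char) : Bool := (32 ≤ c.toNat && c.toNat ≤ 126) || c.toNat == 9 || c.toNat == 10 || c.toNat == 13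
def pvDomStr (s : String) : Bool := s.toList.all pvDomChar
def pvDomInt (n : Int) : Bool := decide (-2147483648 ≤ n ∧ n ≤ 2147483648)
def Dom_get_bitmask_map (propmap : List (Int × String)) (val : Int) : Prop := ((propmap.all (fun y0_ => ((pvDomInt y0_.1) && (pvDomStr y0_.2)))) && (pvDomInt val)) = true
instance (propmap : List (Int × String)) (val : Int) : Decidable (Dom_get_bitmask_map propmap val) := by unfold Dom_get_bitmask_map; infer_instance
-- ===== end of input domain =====

-- B replaces A's iterative low-to-high doubling probe by a recursion stripping the highest
-- set bit and inserting its entry on the way back up (objective: alternative, same cost).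

-- Python's builtin hex(v) for v ≥ 0 (both Pythons call the builtin; exact for the
-- nonnegative powers of two it is applied to here)
def pvHexDigit (d : Nat) : Char := if d < 10 then Char.ofNat (48 + d) else Char.ofNat (87 + d)

def pvHexAux : Nat → List Char → List Char
  | 0, acc => acc
  | n+1, acc => pvHexAux ((n+1) / 16) (pvHexDigit ((n+1) % 16) :: acc)
decreasing_by exact Nat.div_lt_self (Nat.succ_pos n) (by norm_num)

def pvHex (v : Int) : String := String.mk ('0' :: 'x' :: pvHexAux v.toNat [])

-- ===== PORT A =====
-- the while-loop of A; fuel = val.toNat + 1 iterations always suffice for val ≥ 0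
-- (the loop runs at most bit_length(val) ≤ val + 1 times); A does not terminate on val < 0
def pvALoop (pm : PySem.Dict Int String) : Nat → Int → Int → PySem.Dict Int String → PySem.Dict Int String
  | 0, _, _, ret => ret
  | fuel+1, v, val, ret =>
    if val ≠ 0 then
      if PySem.Int.band v val ≠ 0 then
        let ret' := match pm.get? v with
          | some s => ret.insert v s
          | none   => ret.insert v (pvHex v)
        pvALoop pm fuel (v * 2) (val - v) ret'
      else
        pvALoop pm fuel (v * 2) val ret
    else ret

def get_bitmask_map (propmap : List (Int × String)) (val : Int) : List (Int × String) :=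
  (pvALoop (PySem.Dict.ofList propmap) (val.toNat + 1) 1 val PySem.Dict.empty).items

-- ===== PORT B =====
-- B's recursion; fuel = val.toNat + 1 calls always suffice for val ≥ 0 (each call removes
-- the highest set bit, so val strictly decreases); B does not terminate on val < 0
def pvBRec (pm : PySem.Dict Int String) : Nat → Int → PySem.Dict Int String
  | 0, _ => PySem.Dict.empty
  | fuel+1, val =>
    if val ≠ 0 then
      let high : Int := (1 : Int) <<< (PySem.Int.bitLength val - 1)
      let ret := pvBRec pm fuel (val - high)
      match pm.get? high with
      | some s => ret.insert high s
      | none   => ret.insert high (pvHex high)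
    else PySem.Dict.empty

def get_bitmask_map_alt (propmap : List (Int × String)) (val : Int) : List (Int × String) :=
  (pvBRec (PySem.Dict.ofList propmap) (val.toNat + 1) val).items

-- ===== PRECONDITION & SPEC =====
-- Pre_ excludes val < 0, on which neither Python returns (A's while-loop runs forever:
-- v & val is eventually nonzero for every power of two v, so val only becomes more
-- negative; B's recursion likewise never reaches 0 from a negative val).
def Pre_get_bitmask_map (propmap : List (Int × String)) (val : Int) : Prop := 0 ≤ val
instance (propmap : List (Int × String)) (val : Int) : Decidable (Pre_get_bitmask_map propmap val) := by unfold Pre_get_bitmask_map; infer_instance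

def pvWitness_get_bitmask_map : (List (Int × String)) × Int := ([(1, "UP"), (4, "DOWN")], 7)

def Spec_get_bitmask_map (propmap : List (Int × String)) (val : Int) (out : List (Int × String)) : Prop := out = get_bitmask_map_alt propmap val
instance (propmap : List (Int × String)) (val : Int) (out : List (Int × String)) : Decidable (Spec_get_bitmask_map propmap val out) := by unfold Spec_get_bitmask_map; infer_instance

-- ===== CLAIM (what is proved, stated in full; the proofs are below) =====
def Claim_equal_get_bitmask_map : Prop := ∀ (propmap : List (Int × String)) (val : Int), Dom_get_bitmask_map propmap val → Pre_get_bitmask_map propmap val → Spec_get_bitmask_map propmap val (get_bitmask_map propmap val)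

-- ===== LEMMAS AND PROOFS =====

def pvLabel (pm : PySem.Dict Int String) (b : Int) : String :=
  match pm.get? b with
  | some s => s
  | none => pvHex b

def pvIns (d : PySem.Dict Int String) (p : Int × String) : PySem.Dict Int String := d.insert p.1 p.2

-- the common characterization: the (key, label) pairs of n's set bits in ascending order,
-- built by stripping the highest set bit
def pvEntries (pm : PySem.Dict Int String) (n : Nat) : List (Int × String) :=
  if h : n = 0 then [] else
    let hb := PySem.Int.bitLength (n : Int) - 1
    pvEntries pm (n - 2 ^ hb) ++ [((2 : Int) ^ hb, pvLabel pm ((2 : Int) ^ hb))]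
termination_by n
decreasing_by exact Nat.sub_lt (Nat.pos_of_ne_zero h) (Nat.two_pow_pos _)

lemma pv_entries_zero (pm : PySem.Dict Int String) : pvEntries pm 0 = [] := by
  rw [pvEntries]; simp

lemma pv_entries_unfold (pm : PySem.Dict Int String) (n : Nat) (hn : n ≠ 0) :
    pvEntries pm n =
      pvEntries pm (n - 2 ^ (PySem.Int.bitLength (n : Int) - 1)) ++
        [((2 : Int) ^ (PySem.Int.bitLength (n : Int) - 1),
          pvLabel pm ((2 : Int) ^ (PySem.Int.bitLength (n : Int) - 1)))] := by
  rw [pvEntries]; simp [hn]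

lemma pv_bitLength_le (n : Nat) : PySem.Int.bitLength (n : Int) ≤ n + 1 := by
  by_cases h : n = 0
  · subst h; simp only [Nat.cast_zero]; decide
  · have h1 : 2 ^ (PySem.Int.bitLength (n : Int) - 1) ≤ n := by
      have := PySem.Int.two_pow_bitLength_le (n : Int) (by exact_mod_cast h)
      simpa using this
    have h2 : PySem.Int.bitLength (n : Int) - 1 < 2 ^ (PySem.Int.bitLength (n : Int) - 1) :=
      Nat.lt_two_pow_self
    omega

lemma pv_bitLength_bounds (n : Nat) (hn : n ≠ 0) :
    2 ^ (PySem.Int.bitLength (n : Int) - 1) ≤ n ∧ n < 2 ^ (PySem.Int.bitLength (n : Int) - 1 + 1) := by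
  have h1 : 2 ^ (PySem.Int.bitLength (n : Int) - 1) ≤ n := by
    have := PySem.Int.two_pow_bitLength_le (n : Int) (by exact_mod_cast hn)
    simpa using this
  have h2 : n < 2 ^ PySem.Int.bitLength (n : Int) := by
    have := PySem.Int.lt_two_pow_bitLength (n : Int); simpa using this
  have hb1 : 1 ≤ PySem.Int.bitLength (n : Int) := by
    by_contra hc
    have h0 : PySem.Int.bitLength (n : Int) = 0 := by omega
    rw [h0] at h2; simp at h2; omega
  refine ⟨h1, ?_⟩
  have : PySem.Int.bitLength (n : Int) - 1 + 1 = PySem.Int.bitLength (n : Int) := by omega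
  rw [this]; exact h2

lemma pv_bitLength_eq (n : Nat) (h : Nat) (h1 : 2 ^ h ≤ n) (h2 : n < 2 ^ (h+1)) :
    PySem.Int.bitLength (n : Int) = h + 1 := by
  have hn0 : n ≠ 0 := by have := Nat.one_le_two_pow (n := h); omega
  obtain ⟨hle, hlt⟩ := pv_bitLength_bounds n hn0
  set b := PySem.Int.bitLength (n : Int) - 1 with hb
  rcases Nat.lt_trichotomy b h with hc | hc | hc
  · exfalso
    have : (2 : Nat) ^ (b + 1) ≤ 2 ^ h := Nat.pow_le_pow_right (by norm_num) (by omega)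
    omega
  · have hb1 : 1 ≤ PySem.Int.bitLength (n : Int) := by
      by_contra hx
      have h0 : PySem.Int.bitLength (n : Int) = 0 := by omega
      have := PySem.Int.lt_two_pow_bitLength (n : Int)
      rw [h0] at this; simp at this; omega
    omega
  · exfalso
    have : (2 : Nat) ^ (h + 1) ≤ 2 ^ b := Nat.pow_le_pow_right (by norm_num) (by omega)
    omega

-- stripping the LOWEST set bit from pvEntries takes a cons off the front
lemma pv_entries_cons (pm : PySem.Dict Int String) :
    ∀ n k, n ≠ 0 → n % 2 ^ k = 0 → n.testBit k = true →
      pvEntries pm n = ((2 : Int) ^ k, pvLabel pm ((2 : Int) ^ k)) :: pvEntries pm (n - 2 ^ k) := by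
  intro n
  induction n using Nat.strong_induction_on with
  | _ n ih =>
    intro k hn hmod htb
    set h := PySem.Int.bitLength (n : Int) - 1 with hh
    obtain ⟨hle, hlt⟩ := pv_bitLength_bounds n hn
    rw [← hh] at hle hlt
    have hkh : k ≤ h := by
      by_contra hc
      have h2k : 2 ^ k ≤ n := Nat.ge_two_pow_of_testBit htb
      have : (2 : Nat) ^ (h + 1) ≤ 2 ^ k := Nat.pow_le_pow_right (by norm_num) (by omega)
      omega
    -- write n = 2^k * a with a odd
    obtain ⟨a, ha⟩ : 2 ^ k ∣ n := Nat.dvd_of_mod_eq_zero hmod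
    have hdiv : n / 2 ^ k = a := by rw [ha, Nat.mul_div_cancel_left _ (by positivity)]
    have haodd : a % 2 = 1 := by
      have := htb
      rw [Nat.testBit_eq_decide_div_mod_eq, hdiv] at this
      simpa using this
    by_cases hkeq : k = h
    · -- n is a single set bit: n = 2^k
      have hlt' : n < 2 ^ (k + 1) := by rw [hkeq]; exact hlt
      have ha1 : a = 1 := by
        have h2 : n < 2 ^ k * 2 := by rw [pow_succ] at hlt'; exact hlt'
        have hcan : a < 2 := by
          by_contra hc
          push_neg at hc
          have : 2 ^ k * 2 ≤ 2 ^ k * a := Nat.mul_le_mul_left _ hc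
          omega
        omega
      have hne : n = 2 ^ k := by rw [ha, ha1, mul_one]
      rw [pv_entries_unfold pm n hn, ← hh, ← hkeq]
      have hz : n - 2 ^ k = 0 := by omega
      rw [hz, pv_entries_zero]
      simp
    · have hklt : k < h := by omega
      set b := (2 : Nat) ^ (h - k) with hbdef
      have hbe : (2 : Nat) ^ h = 2 ^ k * b := by
        rw [hbdef, ← pow_add]; congr 1; omega
      have hbeven : b = 2 * 2 ^ (h - k - 1) := by
        rw [hbdef, show h - k = (h - k - 1) + 1 by omega, pow_succ, Nat.add_sub_cancel]
        ring
      have hab : b ≤ a := by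
        by_contra hc
        have h1 : a + 1 ≤ b := by omega
        have h2 : 2 ^ k * (a + 1) ≤ 2 ^ k * b := Nat.mul_le_mul_left _ h1
        have h4 : 2 ^ k * (a + 1) = 2 ^ k * a + 2 ^ k := by ring
        have h5 : 0 < 2 ^ k := Nat.two_pow_pos k
        omega
      have hab1 : b + 1 ≤ a := by omega
      set n' := n - 2 ^ h with hn'def
      have hn'eq : n' = 2 ^ k * (a - b) := by rw [hn'def, ha, hbe, Nat.mul_sub]
      have hn'mod : n' % 2 ^ k = 0 := by rw [hn'eq]; exact Nat.mul_mod_right _ _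
      have hn'tb : n'.testBit k = true := by
        rw [Nat.testBit_eq_decide_div_mod_eq, hn'eq, Nat.mul_div_cancel_left _ (by positivity : (0:Nat) < 2^k)]
        have : (a - b) % 2 = 1 := by omega
        simpa using this
      have hn'ne : n' ≠ 0 := by
        have : 2 ^ k ≤ n' := Nat.ge_two_pow_of_testBit hn'tb
        have := Nat.one_le_two_pow (n := k); omega
      have hn'lt : n' < n := by
        have := Nat.one_le_two_pow (n := h); omega
      have hIH := ih n' hn'lt k hn'ne hn'mod hn'tb
      -- n - 2^k still has highest bit 2^h
      have h2k_le : 2 ^ k * (b + 1) ≤ n := by rw [ha]; exact Nat.mul_le_mul_left _ hab1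
      have hnk_ge : 2 ^ h ≤ n - 2 ^ k := by
        have he : 2 ^ k * (b + 1) = 2 ^ h + 2 ^ k := by rw [hbe]; ring
        omega
      have hnk_lt : n - 2 ^ k < 2 ^ (h + 1) := by omega
      have hblk : PySem.Int.bitLength ((n - 2 ^ k : Nat) : Int) = h + 1 :=
        pv_bitLength_eq _ h hnk_ge hnk_lt
      have hnk_ne : n - 2 ^ k ≠ 0 := by
        have := Nat.one_le_two_pow (n := h); omega
      rw [pv_entries_unfold pm n hn, ← hh, hIH,
          pv_entries_unfold pm (n - 2 ^ k) hnk_ne, hblk]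
      simp only [Nat.add_sub_cancel]
      have harg : n - 2 ^ k - 2 ^ h = n' - 2 ^ k := by omega
      rw [harg]
      simp

lemma pv_mod_two_pow_succ (n k : Nat) :
    n % 2 ^ (k+1) = n % 2 ^ k + (n.testBit k).toNat * 2 ^ k := by
  have h := @Nat.mod_mul (2 ^ k) 2 n
  rw [pow_succ]
  rw [h, Nat.toNat_testBit]
  ring

lemma pv_testBit_sub_mod (n k : Nat) :
    (n - n % 2 ^ k).testBit k = n.testBit k := by
  have hm : n - n % 2 ^ k = 2 ^ k * (n / 2 ^ k) := by
    have := Nat.div_add_mod n (2 ^ k); omega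
  rw [hm, Nat.testBit_two_pow_mul]
  simp [Nat.testBit_eq_decide_div_mod_eq]

-- A's loop, started at bit k on n with the low k bits already cleared, folds the
-- remaining entries of n into ret
lemma pv_main_A (pm : PySem.Dict Int String) (n : Nat) :
    ∀ d k fuel ret, PySem.Int.bitLength (n : Int) ≤ k + d → d ≤ fuel →
      pvALoop pm fuel ((2 : Int) ^ k) ((n - n % 2 ^ k : Nat) : Int) ret
        = (pvEntries pm (n - n % 2 ^ k)).foldl pvIns ret := by
  intro d
  induction d with
  | zero =>
    intro k fuel ret hbl _
    have hlt : n < 2 ^ k := by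
      calc n = (n : Int).natAbs := by simp
        _ < 2 ^ PySem.Int.bitLength (n : Int) := PySem.Int.lt_two_pow_bitLength _
        _ ≤ 2 ^ k := Nat.pow_le_pow_right (by norm_num) (by omega)
    have hz : n - n % 2 ^ k = 0 := by
      have := Nat.mod_eq_of_lt hlt; omega
    rw [hz, pv_entries_zero]
    cases fuel <;> simp [pvALoop]
  | succ d ih =>
    intro k fuel ret hbl hfuel
    by_cases hk : PySem.Int.bitLength (n : Int) ≤ k
    · have hlt : n < 2 ^ k := by
        calc n = (n : Int).natAbs := by simp
          _ < 2 ^ PySem.Int.bitLength (n : Int) := PySem.Int.lt_two_pow_bitLength _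
          _ ≤ 2 ^ k := Nat.pow_le_pow_right (by norm_num) hk
      have hz : n - n % 2 ^ k = 0 := by
        have := Nat.mod_eq_of_lt hlt; omega
      rw [hz, pv_entries_zero]
      cases fuel <;> simp [pvALoop]
    · rw [not_le] at hk
      have hn0 : n ≠ 0 := by
        intro h; subst h; simp at hk
      have hpow : 2 ^ k ≤ n := by
        calc 2 ^ k ≤ 2 ^ (PySem.Int.bitLength (n : Int) - 1) := Nat.pow_le_pow_right (by norm_num) (by omega)
          _ ≤ (n : Int).natAbs := PySem.Int.two_pow_bitLength_le _ (by exact_mod_cast hn0)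
          _ = n := by simp
      obtain ⟨fuel', rfl⟩ : ∃ f, fuel = f + 1 := ⟨fuel - 1, by omega⟩
      set m : Nat := n - n % 2 ^ k with hm
      have hmod_lt : n % 2 ^ k < 2 ^ k := Nat.mod_lt _ (by positivity)
      have hmne : m ≠ 0 := by omega
      have hmmod : m % 2 ^ k = 0 := by
        have hm2 : m = 2 ^ k * (n / 2 ^ k) := by
          have := Nat.div_add_mod n (2 ^ k); omega
        rw [hm2]; exact Nat.mul_mod_right _ _
      -- A's branch test decides testBit k n
      have hAtest : PySem.Int.band ((2 : Int) ^ k) (m : Int) = ((2 ^ k &&& m : Nat) : Int) := by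
        rw [show ((2 : Int) ^ k) = ((2 ^ k : Nat) : Int) by push_cast; ring]
        exact PySem.Int.band_natCast _ _
      have hAnat : 2 ^ k &&& m = 2 ^ k * (n.testBit k).toNat := by
        rw [Nat.two_pow_and, pv_testBit_sub_mod]
      by_cases htb : n.testBit k
      · -- bit k set: A inserts and subtracts; the entries list takes a cons off the front
        have hmod1 : n % 2 ^ (k+1) = n % 2 ^ k + 2 ^ k := by
          have := pv_mod_two_pow_succ n k; rw [htb] at this; simpa using this
        have hAne : PySem.Int.band ((2 : Int) ^ k) (m : Int) ≠ 0 := by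
          rw [hAtest, hAnat, htb]; simp
        have hstepA : pvALoop pm (fuel' + 1) ((2 : Int) ^ k) (m : Int) ret
            = pvALoop pm fuel' ((2 : Int) ^ k * 2) ((m : Int) - 2 ^ k)
                (match pm.get? ((2 : Int) ^ k) with
                  | some s => ret.insert ((2 : Int) ^ k) s
                  | none   => ret.insert ((2 : Int) ^ k) (pvHex ((2 : Int) ^ k))) := by
          rw [pvALoop]
          simp only [if_pos (by exact_mod_cast hmne : (m : Int) ≠ 0), if_pos hAne]
        have hmtb : m.testBit k = true := by rw [hm, pv_testBit_sub_mod, htb]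
        have hm2k : 2 ^ k ≤ m := Nat.ge_two_pow_of_testBit hmtb
        have hval' : (m : Int) - 2 ^ k = ((n - n % 2 ^ (k+1) : Nat) : Int) := by
          have h1 : n % 2 ^ k ≤ n := Nat.mod_le _ _
          have h2 : n % 2 ^ (k+1) ≤ n := Nat.mod_le _ _
          simp only [hm]
          rw [Nat.cast_sub h1, Nat.cast_sub h2, hmod1]
          push_cast
          ring
        have hinsert : (match pm.get? ((2 : Int) ^ k) with
              | some s => ret.insert ((2 : Int) ^ k) s
              | none   => ret.insert ((2 : Int) ^ k) (pvHex ((2 : Int) ^ k)))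
            = pvIns ret ((2 : Int) ^ k, pvLabel pm ((2 : Int) ^ k)) := by
          rcases hpm : pm.get? ((2 : Int) ^ k) with _ | s <;> simp [pvIns, pvLabel, hpm]
        have hcons := pv_entries_cons pm m k hmne hmmod hmtb
        have hmsub : m - 2 ^ k = n - n % 2 ^ (k+1) := by omega
        rw [hstepA, hval', hinsert, hcons, hmsub]
        simp only [List.foldl_cons]
        have := ih (k+1) fuel' (pvIns ret ((2 : Int) ^ k, pvLabel pm ((2 : Int) ^ k))) (by omega) (by omega)
        rw [show (2 : Int) ^ k * 2 = (2 : Int) ^ (k+1) by ring]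
        exact this
      · -- bit k clear: A skips, the cleared value is unchanged
        rw [Bool.not_eq_true] at htb
        have hmod1 : n % 2 ^ (k+1) = n % 2 ^ k := by
          have := pv_mod_two_pow_succ n k; rw [htb] at this; simpa using this
        have hAeq : PySem.Int.band ((2 : Int) ^ k) (m : Int) = 0 := by
          rw [hAtest, hAnat, htb]; simp
        have hstepA : pvALoop pm (fuel' + 1) ((2 : Int) ^ k) (m : Int) ret
            = pvALoop pm fuel' ((2 : Int) ^ k * 2) (m : Int) ret := by
          rw [pvALoop]
          simp only [if_pos (by exact_mod_cast hmne : (m : Int) ≠ 0)]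
          rw [if_neg (by simpa using hAeq)]
        rw [hstepA]
        have := ih (k+1) fuel' ret (by omega) (by omega)
        rw [show (2 : Int) ^ k * 2 = (2 : Int) ^ (k+1) by ring,
            show ((n - n % 2 ^ k : Nat) : Int) = ((n - n % 2 ^ (k+1) : Nat) : Int) by rw [hmod1],
            show m = n - n % 2 ^ (k+1) from by omega]
        exact this

-- B's recursion computes the same fold
lemma pv_main_B (pm : PySem.Dict Int String) :
    ∀ n, ∀ fuel, n < fuel →
      pvBRec pm fuel (n : Int) = (pvEntries pm n).foldl pvIns PySem.Dict.empty := by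
  intro n
  induction n using Nat.strong_induction_on with
  | _ n ih =>
    intro fuel hfuel
    obtain ⟨f, rfl⟩ : ∃ f, fuel = f + 1 := ⟨fuel - 1, by omega⟩
    by_cases hn : n = 0
    · subst hn
      rw [pv_entries_zero]
      simp [pvBRec]
    · set h := PySem.Int.bitLength (n : Int) - 1 with hh
      obtain ⟨hle, _⟩ := pv_bitLength_bounds n hn
      rw [← hh] at hle
      have hshift : (1 : Int) <<< (PySem.Int.bitLength ((n : Nat) : Int) - 1) = (2 : Int) ^ h := by
        rw [hh, Int.shiftLeft_eq]; ring
      have hsub : (n : Int) - (2 : Int) ^ h = ((n - 2 ^ h : Nat) : Int) := by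
        rw [Nat.cast_sub hle]; push_cast; ring
      have hlt : n - 2 ^ h < n := by
        have := Nat.one_le_two_pow (n := h); omega
      have hIH := ih (n - 2 ^ h) hlt f (by omega)
      rw [pvBRec]
      simp only [if_pos (by exact_mod_cast hn : (n : Int) ≠ 0)]
      rw [hshift, hsub, hIH, pv_entries_unfold pm n hn, ← hh]
      rcases hpm : pm.get? ((2 : Int) ^ h) with _ | s <;>
        simp [List.foldl_append, pvIns, pvLabel, hpm]

-- ===== VERDICT (by name: the statement is the Claim_ definition above) =====
theorem get_bitmask_map_spec : Claim_equal_get_bitmask_map := by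
  intro propmap val _ hpre
  have h0 : (0 : Int) ≤ val := hpre
  obtain ⟨n, rfl⟩ : ∃ m : Nat, val = (m : Int) := ⟨val.toNat, by omega⟩
  unfold Spec_get_bitmask_map get_bitmask_map get_bitmask_map_alt
  have hA := pv_main_A (PySem.Dict.ofList propmap) n (n + 1) 0 (n + 1) PySem.Dict.empty
      (by simpa using pv_bitLength_le n) (le_refl _)
  have hB := pv_main_B (PySem.Dict.ofList propmap) n (n + 1) (by omega)
  simp only [pow_zero, Nat.mod_one, Nat.sub_zero] at hA
  rw [Int.toNat_natCast, hA, hB]
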